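-- pv_equiv track=rewrite | github.com/swethasadanala/infytq-solved-ques | password generation.py | pas
-- ===== SOURCE A (Python) =====
-- def pas(ss,n):
--     l=len(ss)
--     while l!=0:
--         if str(l) in n :
--             return ss[l-1]
--         else:
--             l-=1
--     return "x"
-- ===== SOURCE B (Python) =====
-- def pas(ss, n):
--     hits = [l for l in range(1, len(ss) + 1) if str(l) in n]
--     return ss[max(hits) - 1] if hits else "x"
-- ===== Notes on version B (the rewrite author's own statement) =====
-- stated objective: simpler
-- what changed: Replaces the descending early-return while-loop by a collect-all-then-select decomposition: build the ascending list of lengths l with str(l) in n, then index ss at max(hits)-1 (or return 'x' if none match).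
import Mathlib
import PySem

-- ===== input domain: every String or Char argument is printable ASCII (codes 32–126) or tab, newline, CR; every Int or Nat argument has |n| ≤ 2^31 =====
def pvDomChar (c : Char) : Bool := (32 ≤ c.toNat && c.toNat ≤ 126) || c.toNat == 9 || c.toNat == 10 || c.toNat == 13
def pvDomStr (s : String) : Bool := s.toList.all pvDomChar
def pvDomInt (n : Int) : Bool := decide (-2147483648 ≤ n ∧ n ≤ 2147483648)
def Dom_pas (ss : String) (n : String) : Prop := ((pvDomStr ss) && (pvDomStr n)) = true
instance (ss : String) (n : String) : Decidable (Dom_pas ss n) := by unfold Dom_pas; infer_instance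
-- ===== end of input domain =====

-- B is simpler: collect all matching lengths ascending, then pick the maximum,
-- instead of A's descending early-return scan. Return value only; both are total.

-- ===== PORT A =====
-- the while-loop: l counts down from len(ss); returns ss[l-1] at the first hit
def pasGo (ss : String) (n : String) : Nat → String
  | 0 => "x"
  | l + 1 =>
    if PySem.Str.isIn (PySem.Int.toStr ((l : Int) + 1)) n then
      match PySem.Str.pyGet? ss ((l : Int) + 1 - 1) with
      | some c => String.ofList [c]
      | none => "x"   -- unreachable: 0 ≤ l < len ss
    else pasGo ss n l

def pas (ss : String) (n : String) : String :=
  pasGo ss n ss.toList.length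

-- ===== PORT B =====
def pas_alt (ss : String) (n : String) : String :=
  let hits := (PySem.List.pyRange 1 ((PySem.Str.len ss : Int) + 1) 1).filter
      (fun l => PySem.Str.isIn (PySem.Int.toStr l) n)
  match PySem.List.max? hits (fun z => z) with
  | some m =>
    match PySem.Str.pyGet? ss (m - 1) with
    | some c => String.ofList [c]
    | none => "x"   -- unreachable: 1 ≤ m ≤ len ss
  | none => "x"

-- ===== PRECONDITION & SPEC =====
def Spec_pas (ss : String) (n : String) (out : String) : Prop := out = pas_alt ss n
instance (ss : String) (n : String) (out : String) : Decidable (Spec_pas ss n out) := by unfold Spec_pas; infer_instance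

-- ===== CLAIM (what is proved, stated in full; the proofs are below) =====
def Claim_equal_pas : Prop := ∀ (ss : String) (n : String), Dom_pas ss n → Spec_pas ss n (pas ss n)

-- ===== LEMMAS AND PROOFS =====

theorem foldl_max_le (t : List Int) (x y : Int) (hx : x ≤ y) (h : ∀ z ∈ t, z ≤ y) :
    t.foldl max x ≤ y := by
  induction t generalizing x with
  | nil => simpa using hx
  | cons a t ih =>
    simp only [List.foldl_cons]
    exact ih (max x a) (max_le hx (h a (by simp))) (fun z hz => h z (by simp [hz]))

theorem max?_append_singleton (xs : List Int) (y : Int) (h : ∀ x ∈ xs, x ≤ y) :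
    PySem.List.max? (xs ++ [y]) (fun z => z) = some y := by
  cases xs with
  | nil => simp [PySem.List.max?_id_cons]
  | cons x t =>
    rw [List.cons_append, PySem.List.max?_id_cons, List.foldl_append]
    simp only [List.foldl_cons, List.foldl_nil, Option.some.injEq]
    have hx : x ≤ y := h x (by simp)
    have := foldl_max_le t x y hx (fun z hz => h z (by simp [hz]))
    omega

-- the loop from L equals B's collect-then-max over [1, L]
theorem pasGo_eq (ss n : String) (L : Nat) :
    pasGo ss n L =
      (match PySem.List.max?
          ((PySem.List.pyRange 1 ((L : Int) + 1) 1).filter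
            (fun l => PySem.Str.isIn (PySem.Int.toStr l) n)) (fun z => z) with
      | some m =>
        match PySem.Str.pyGet? ss (m - 1) with
        | some c => String.ofList [c]
        | none => "x"
      | none => "x") := by
  induction L with
  | zero => simp [pasGo, PySem.List.pyRange, PySem.List.max?]
  | succ k ih =>
    have hsplit : PySem.List.pyRange 1 ((k : Int) + 1 + 1) 1 =
        PySem.List.pyRange 1 ((k : Int) + 1) 1 ++ [(k : Int) + 1] := by
      rw [PySem.List.pyRange_one_append 1 ((k : Int) + 1) ((k : Int) + 1 + 1)
        (by omega) (by omega)]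
      congr 1
      rw [PySem.List.pyRange_one_cons (show ((k : Int) + 1) < ((k : Int) + 1 + 1) by omega)]
      simp [PySem.List.pyRange]
    simp only [pasGo, Nat.cast_succ, hsplit, List.filter_append]
    by_cases hk : PySem.Str.isIn (PySem.Int.toStr ((k : Int) + 1)) n = true
    · rw [if_pos hk]
      have hle : ∀ x ∈ (PySem.List.pyRange 1 ((k : Int) + 1) 1).filter
          (fun l => PySem.Str.isIn (PySem.Int.toStr l) n), x ≤ (k : Int) + 1 := by
        intro x hx
        have := List.mem_of_mem_filter hx
        have := PySem.List.mem_pyRange_one.mp this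
        omega
      have hfilt : List.filter (fun l => PySem.Str.isIn (PySem.Int.toStr l) n)
          [(k : Int) + 1] = [(k : Int) + 1] := by
        have hk' := hk; simp only [PySem.Str.isIn_eq, PySem.Int.toList_toStr] at hk'; simp [hk']
      rw [hfilt, max?_append_singleton _ _ hle]
    · have hfilt : List.filter (fun l => PySem.Str.isIn (PySem.Int.toStr l) n)
          [(k : Int) + 1] = [] := by
        have hk' := hk; simp only [PySem.Str.isIn_eq, PySem.Int.toList_toStr] at hk'; simp [hk']
      rw [if_neg hk, hfilt, List.append_nil, ih]

-- ===== VERDICT (by name: the statement is the Claim_ definition above) =====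
theorem pas_spec : Claim_equal_pas := by
  intro ss n _
  unfold Spec_pas pas pas_alt
  exact pasGo_eq ss n ss.toList.length
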